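-- pv_equiv track=rewrite | github.com/dudamarlena/pyc_source | pycfiles/knxsonos-0.2.2.linux-x86_64.tar/knxsonos.py | maybeExpandMacro
-- ===== SOURCE A (Python) =====
-- def maybeExpandMacro(macros, cl):
--     ret = []
--     for c, p in cl:
--         if c in macros.keys():
--             ret.extend(maybeExpandMacro(macros, macros[c]))
--         else:
--             ret.append((c, p))
--
--     return ret
-- ===== SOURCE B (Python) =====
-- def maybeExpandMacro(macros, cl):
--     ret = []
--     stack = list(cl)[::-1]
--     while stack:
--         c, p = stack.pop()
--         if c in macros.keys():
--             stack.extend(list(macros[c])[::-1])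
--         else:
--             ret.append((c, p))
--     return ret
-- ===== Notes on version B (the rewrite author's own statement) =====
-- stated objective: alternative
-- what changed: Replaces A's recursion (one Python call frame per macro expansion) with a single iterative while-loop over an explicit worklist stack onto which macro bodies are pushed in reverse.
import Mathlib
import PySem

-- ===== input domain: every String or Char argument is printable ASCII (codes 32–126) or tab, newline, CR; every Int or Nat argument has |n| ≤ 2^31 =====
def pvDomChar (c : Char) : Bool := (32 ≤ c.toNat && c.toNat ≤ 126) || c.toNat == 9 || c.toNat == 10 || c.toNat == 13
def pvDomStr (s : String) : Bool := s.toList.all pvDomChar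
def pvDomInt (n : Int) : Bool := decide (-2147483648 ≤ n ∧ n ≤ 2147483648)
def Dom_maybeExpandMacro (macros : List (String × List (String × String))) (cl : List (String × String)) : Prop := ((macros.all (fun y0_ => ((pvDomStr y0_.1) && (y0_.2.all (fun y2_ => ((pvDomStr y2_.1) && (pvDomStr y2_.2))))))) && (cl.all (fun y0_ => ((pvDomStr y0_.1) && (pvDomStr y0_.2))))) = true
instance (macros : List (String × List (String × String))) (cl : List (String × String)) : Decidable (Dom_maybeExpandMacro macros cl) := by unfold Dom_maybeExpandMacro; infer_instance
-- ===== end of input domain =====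

-- B replaces A's recursive expansion by an iterative worklist stack (same output, same order).

-- ===== PORT A =====
-- 'c in macros.keys()' / 'macros[c]' — first-match association lookup (Python dict keys are unique)
-- A's recursion is not structurally terminating (cyclic macros recurse forever); the fuel
-- argument is a pure totality guard: Pre_ guarantees the chosen fuel is never exhausted.
def pvExpandF (macros : List (String × List (String × String))) : Nat → List (String × String) → List (String × String)
  | 0, _ => []
  | f+1, cl => cl.foldl (fun ret cp =>
      match macros.lookup cp.1 with
      | some body => ret ++ pvExpandF macros f body
      | none => ret ++ [cp]) []

def maybeExpandMacro (macros : List (String × List (String × String))) (cl : List (String × String)) : List (String × String) :=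
  pvExpandF macros (macros.length + 2) cl

-- ===== PORT B =====
-- Step count of B's while-loop on this worklist (totality guard for the loop below;
-- under Pre_ it is exactly the number of iterations B performs, so the fuel never runs out).
def pvCostF (macros : List (String × List (String × String))) : Nat → List (String × String) → Nat
  | 0, _ => 0
  | _+1, [] => 0
  | f+1, cp :: rest =>
      (match macros.lookup cp.1 with
       | some body => 1 + pvCostF macros f body
       | none => 1) + pvCostF macros (f+1) rest

-- B's while-loop. Python pops from the END of 'list(cl)[::-1]' and pushes 'list(macros[c])[::-1]';
-- popping the tail of a reversed list is popping the HEAD of the unreversed one, so the stack is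
-- represented top-at-head: it starts as cl and a macro body is pushed as 'body ++ stack'.
def pvLoopB (macros : List (String × List (String × String))) : Nat → List (String × String) → List (String × String) → List (String × String)
  | 0, _, ret => ret
  | _+1, [], ret => ret
  | f+1, cp :: st, ret =>
      match macros.lookup cp.1 with
      | some body => pvLoopB macros f (body ++ st) ret
      | none => pvLoopB macros f st (ret ++ [cp])

def maybeExpandMacro_alt (macros : List (String × List (String × String))) (cl : List (String × String)) : List (String × String) :=
  pvLoopB macros (pvCostF macros (macros.length + 2) cl) cl []

-- ===== PRECONDITION & SPEC =====
-- Depth of the longest macro-reference chain starting at key k, truncated at the given bound.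
-- This is a property of the INPUT's reference graph only (it never computes an expansion); it is
-- used solely to state, decidably, that no cycle is reachable from cl in Pre_ below: a chain of
-- distinct keys is shorter than the number of keys, while a reachable cycle yields chains of
-- every length.
def pvRkF (macros : List (String × List (String × String))) : Nat → String → Nat
  | 0, _ => 0
  | f+1, k =>
      match macros.lookup k with
      | some body => 1 + body.foldl (fun a cp => max a (pvRkF macros f cp.1)) 0
      | none => 0

-- Pre_ excludes exactly the inputs on which A fails to return: a macro-reference cycle reachable
-- from cl (there A raises RecursionError and B loops forever). 'No reachable cycle' is equivalent
-- to every macro chain from cl being shorter than the number of keys, which is what the bounded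
-- chain-depth pvRkF states.
def Pre_maybeExpandMacro (macros : List (String × List (String × String))) (cl : List (String × String)) : Prop :=
  ∀ cp ∈ cl, pvRkF macros (macros.length + 1) cp.1 ≤ macros.length

instance (macros : List (String × List (String × String))) (cl : List (String × String)) : Decidable (Pre_maybeExpandMacro macros cl) := by
  unfold Pre_maybeExpandMacro; infer_instance

def pvWitness_maybeExpandMacro : (List (String × List (String × String))) × (List (String × String)) :=
  ([("M", [("x", "1")])], [("M", ""), ("y", "2")])

def Spec_maybeExpandMacro (macros : List (String × List (String × String))) (cl : List (String × String)) (out : List (String × String)) : Prop := out = maybeExpandMacro_alt macros cl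
instance (macros : List (String × List (String × String))) (cl : List (String × String)) (out : List (String × String)) : Decidable (Spec_maybeExpandMacro macros cl out) := by unfold Spec_maybeExpandMacro; infer_instance

-- ===== CLAIM (what is proved, stated in full; the proofs are below) =====
def Claim_equal_maybeExpandMacro : Prop := ∀ (macros : List (String × List (String × String))) (cl : List (String × String)), Dom_maybeExpandMacro macros cl → Pre_maybeExpandMacro macros cl → Spec_maybeExpandMacro macros cl (maybeExpandMacro macros cl)

-- ===== LEMMAS AND PROOFS =====

theorem pvInit_le_foldl_max (g : String × String → Nat) :
    ∀ (l : List (String × String)) (a : Nat), a ≤ l.foldl (fun a cp => max a (g cp)) a := by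
  intro l
  induction l with
  | nil => intro a; simp
  | cons x rest ih =>
      intro a
      simpa using le_trans (Nat.le_max_left a (g x)) (ih (max a (g x)))

theorem pvMem_le_foldl_max (g : String × String → Nat) :
    ∀ (l : List (String × String)) (a : Nat) (x : String × String), x ∈ l →
      g x ≤ l.foldl (fun a cp => max a (g cp)) a := by
  intro l
  induction l with
  | nil => intro a x hx; cases hx
  | cons y rest ih =>
      intro a x hx
      rcases List.mem_cons.mp hx with h | h
      · subst h
        simpa using le_trans (Nat.le_max_right a (g x)) (pvInit_le_foldl_max g rest _)
      · simpa using ih _ x h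

-- foldl with an appending step: the accumulator factors out.
theorem pvExpandF_foldl_acc (macros : List (String × List (String × String))) (f : Nat) :
    ∀ (cl : List (String × String)) (init : List (String × String)),
      cl.foldl (fun ret cp =>
        match macros.lookup cp.1 with
        | some body => ret ++ pvExpandF macros f body
        | none => ret ++ [cp]) init
      = init ++ cl.foldl (fun ret cp =>
        match macros.lookup cp.1 with
        | some body => ret ++ pvExpandF macros f body
        | none => ret ++ [cp]) [] := by
  intro cl
  induction cl with
  | nil => intro init; simp
  | cons x rest ih =>
      intro init
      simp only [List.foldl_cons]
      rw [ih, ih (match macros.lookup x.1 with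
        | some body => [] ++ pvExpandF macros f body
        | none => [] ++ [x])]
      cases macros.lookup x.1 <;> simp

theorem pvExpandF_cons (macros : List (String × List (String × String))) (f : Nat)
    (cp : String × String) (rest : List (String × String)) :
    pvExpandF macros (f+1) (cp :: rest)
      = (match macros.lookup cp.1 with
         | some body => pvExpandF macros f body
         | none => [cp]) ++ pvExpandF macros (f+1) rest := by
  show List.foldl _ _ (cp :: rest) = _
  simp only [List.foldl_cons]
  rw [pvExpandF_foldl_acc]
  show _ = _ ++ pvExpandF macros (f+1) rest
  cases macros.lookup cp.1 <;> simp [pvExpandF]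

-- Main simulation: with step-count fuel, B's worklist loop consumes a prefix cl of the stack and
-- appends exactly A's expansion of cl to ret; m bounds the chain depth of the keys in cl.
theorem pvBmain (macros : List (String × List (String × String))) :
    ∀ (m : Nat) (cl : List (String × String)),
      (∀ cp ∈ cl, pvRkF macros m cp.1 < m) →
      ∀ (st ret : List (String × String)) (f : Nat),
        pvLoopB macros (pvCostF macros (m+1) cl + f) (cl ++ st) ret
          = pvLoopB macros f st (ret ++ pvExpandF macros (m+1) cl) := by
  intro m
  induction m with
  | zero =>
      intro cl
      induction cl with
      | nil => intro _ st ret f; simp [pvCostF, pvExpandF]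
      | cons cp rest ih =>
          intro h st ret f
          exact absurd (h cp List.mem_cons_self) (Nat.not_lt_zero _)
  | succ m ihm =>
      intro cl
      induction cl with
      | nil => intro _ st ret f; simp [pvCostF, pvExpandF]
      | cons cp rest ih =>
          intro h st ret f
          cases h' : macros.lookup cp.1 with
          | none =>
              have hcost : pvCostF macros (m+2) (cp :: rest) = 1 + pvCostF macros (m+2) rest := by
                simp [pvCostF, h']
              have hfuel : pvCostF macros (m+2) (cp :: rest) + f
                  = (pvCostF macros (m+2) rest + f) + 1 := by rw [hcost]; omega
              rw [hfuel]
              simp only [List.cons_append, pvLoopB, h']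
              rw [ih (fun x hx => h x (List.mem_cons_of_mem _ hx)) st (ret ++ [cp]) f]
              rw [pvExpandF_cons, h']
              simp
          | some body =>
              have hcost : pvCostF macros (m+2) (cp :: rest)
                  = (1 + pvCostF macros (m+1) body) + pvCostF macros (m+2) rest := by
                simp [pvCostF, h']
              have hfuel : pvCostF macros (m+2) (cp :: rest) + f
                  = (pvCostF macros (m+1) body + (pvCostF macros (m+2) rest + f)) + 1 := by
                rw [hcost]; omega
              rw [hfuel]
              simp only [List.cons_append, pvLoopB, h']
              have hbody : ∀ x ∈ body, pvRkF macros m x.1 < m := by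
                intro x hx
                have h1 : pvRkF macros m x.1
                    ≤ body.foldl (fun a cp => max a (pvRkF macros m cp.1)) 0 :=
                  pvMem_le_foldl_max (fun cp => pvRkF macros m cp.1) body 0 x hx
                have h2 : pvRkF macros (m+1) cp.1
                    = 1 + body.foldl (fun a cp => max a (pvRkF macros m cp.1)) 0 := by
                  simp only [pvRkF, h']
                have h3 : pvRkF macros (m+1) cp.1 < m + 1 := h cp List.mem_cons_self
                simp only [] at h1
                omega
              have := ihm body hbody (rest ++ st) ret (pvCostF macros (m+2) rest + f)
              rw [this]
              rw [ih (fun x hx => h x (List.mem_cons_of_mem _ hx)) st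
                (ret ++ pvExpandF macros (m+1) body) f]
              rw [pvExpandF_cons, h']
              simp

-- ===== VERDICT (by name: the statement is the Claim_ definition above) =====
theorem maybeExpandMacro_spec : Claim_equal_maybeExpandMacro := by
  intro macros cl _ hpre
  unfold Spec_maybeExpandMacro maybeExpandMacro maybeExpandMacro_alt
  have htop : ∀ cp ∈ cl, pvRkF macros (macros.length + 1) cp.1 < macros.length + 1 := by
    intro cp hcp
    exact Nat.lt_succ_of_le (hpre cp hcp)
  have := pvBmain macros (macros.length + 1) cl htop [] [] 0
  simp only [List.append_nil, Nat.add_zero, List.nil_append] at this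
  rw [this]
  rfl
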